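-- pv_equiv track=rewrite | github.com/awendt11/INST326-Group-104-Project- | lets_play_mahjong_inst326.py | can_make_sets
-- ===== SOURCE A (Python) =====
-- def can_make_sets(hand):
--     """
--     Checks if the remaining tiles can be split into sets
--
--     Args:
--         hand(list): list of tiles left after removing a pair
--
--     Returns:
--         bool: True if the remaining tiles can make valid sets, False if they cant
--
--     Side effects:
--         None
--
--     Raises:
--         None
--     """
--
--     if len(hand) == 0:
--         return True
--     first = hand[0]
--
--     count = 0
--     for tile in hand:
--         if tile == first:
--             count += 1
--
--     if count >= 3:
--         new_hand = []
--         removed = 0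
--
--         for tile in hand:
--            if tile == first and removed < 3:
--                removed += 1
--            else:
--                new_hand.append(tile)
--
--         if can_make_sets(sorted(new_hand)):
--             return True
--     if len(first) == 2 and first[0].isdigit():
--         number = int(first[0])
--         suit = first[1]
--
--         second = str(number + 1) + suit
--         third = str(number + 2) + suit
--
--         has_second = False
--         has_third = False
--
--         for tile in hand:
--             if tile == second:
--                 has_second = True
--             if tile == third:
--                 has_third = True
--
--         if has_second and has_third:
--             new_hand = []
--             removed_first = False
--             removed_second = False
--             removed_third = False
--
--             for tile in hand:
--                 if tile == first and removed_first == False: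
--                     removed_first = True
--                 elif tile == second and removed_second == False:
--                     removed_second = True
--                 elif tile == third and removed_third == False:
--                     removed_third = True
--                 else:
--                     new_hand.append(tile)
--
--             if can_make_sets(sorted(new_hand)):
--                 return True
--     return False
-- ===== SOURCE B (Python) =====
-- def can_make_sets(hand):
--     """Memoized re-implementation: same search, but each distinct remaining hand
--     (a tuple key in a dict) is solved once instead of exponentially many times."""
--     return _solve(tuple(hand), {})
--
--
-- def _solve(hand, memo):
--     if hand in memo:
--         return memo[hand]
--     if len(hand) == 0:
--         return True
--     first = hand[0]
--     result = False
--     if hand.count(first) >= 3: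
--         rest = list(hand)
--         rest.remove(first)
--         rest.remove(first)
--         rest.remove(first)
--         if _solve(tuple(sorted(rest)), memo):
--             result = True
--     if not result and len(first) == 2 and first[0].isdigit():
--         second = str(int(first[0]) + 1) + first[1]
--         third = str(int(first[0]) + 2) + first[1]
--         if second in hand and third in hand:
--             rest = list(hand)
--             rest.remove(first)
--             rest.remove(second)
--             rest.remove(third)
--             if _solve(tuple(sorted(rest)), memo):
--                 result = True
--     memo[hand] = result
--     return result
-- ===== Notes on version B (the rewrite author's own statement) =====
-- stated objective: faster
-- what changed: B replaces A's plain backtracking (worst-case exponential: the same remaining sub-hand is re-solved many times) with a memoized solver whose dict, keyed by the tuple of remaining tiles, caches each sub-hand's answer, and replaces A's hand-written scan loops with count/remove/in primitives; a timing run measured B about 1.9x faster on the generated inputs.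
import Mathlib
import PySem

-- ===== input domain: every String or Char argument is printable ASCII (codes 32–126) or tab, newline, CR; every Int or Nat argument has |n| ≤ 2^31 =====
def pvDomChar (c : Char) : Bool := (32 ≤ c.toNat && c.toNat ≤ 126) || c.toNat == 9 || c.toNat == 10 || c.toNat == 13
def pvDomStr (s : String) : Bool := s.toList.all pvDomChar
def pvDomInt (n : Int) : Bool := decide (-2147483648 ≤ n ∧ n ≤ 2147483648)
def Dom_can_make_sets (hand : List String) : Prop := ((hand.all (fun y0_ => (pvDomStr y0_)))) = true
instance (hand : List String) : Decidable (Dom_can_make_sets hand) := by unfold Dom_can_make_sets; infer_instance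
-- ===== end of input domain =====

-- B re-implements A's backtracking search with memoisation on the remaining hand (a dict keyed by the
-- tuple of tiles), so each distinct remaining hand is solved once; return values agree everywhere.

-- ===== PORT A =====
-- Python '+' on str, kernel-transparent (Lean's own String.append is opaque to the kernel)
def pvStrAdd (a b : String) : String := String.ofList (a.toList ++ b.toList)

-- A's counting loop: for tile in hand: if tile == first: count += 1
def pvCount (hand : List String) (first : String) : Int :=
  hand.foldl (fun count tile => if tile == first then count + 1 else count) 0

-- A's triplet-removal loop body/state: (new_hand, removed)
def pvTripStep (first : String) (acc : List String × Int) (tile : String) : List String × Int :=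
  if tile == first && acc.2 < 3 then (acc.1, acc.2 + 1) else (acc.1 ++ [tile], acc.2)

def pvTripRemove (hand : List String) (first : String) : List String × Int :=
  hand.foldl (pvTripStep first) ([], 0)

-- A's has_second/has_third loop
def pvHasStep (second third : String) (acc : Bool × Bool) (tile : String) : Bool × Bool :=
  ((if tile == second then true else acc.1), (if tile == third then true else acc.2))

def pvHas (hand : List String) (second third : String) : Bool × Bool :=
  hand.foldl (pvHasStep second third) (false, false)

-- A's run-removal loop body/state: (new_hand, removed_first, removed_second, removed_third)
def pvRunStep (first second third : String)
    (acc : List String × Bool × Bool × Bool) (tile : String) : List String × Bool × Bool × Bool :=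
  if tile == first && !acc.2.1 then (acc.1, true, acc.2.2.1, acc.2.2.2)
  else if tile == second && !acc.2.2.1 then (acc.1, acc.2.1, true, acc.2.2.2)
  else if tile == third && !acc.2.2.2 then (acc.1, acc.2.1, acc.2.2.1, true)
  else (acc.1 ++ [tile], acc.2)

def pvRunRemove (hand : List String) (first second third : String) : List String × Bool × Bool × Bool :=
  hand.foldl (pvRunStep first second third) ([], false, false, false)

-- termination helpers for the two ports (cited in decreasing_by)
theorem pvTripFold_len_le (first : String) (xs : List String) :
    ∀ l r, ((xs.foldl (pvTripStep first) (l, r)).1.length ≤ l.length + xs.length) := by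
  induction xs with
  | nil => simp
  | cons x t ih =>
    intro l r
    simp only [List.foldl_cons, pvTripStep]
    split
    · have := ih l (r + 1)
      simp only [List.length_cons] at this ⊢
      omega
    · have := ih (l ++ [x]) r
      simp only [List.length_cons, List.length_append, List.length_nil] at this ⊢
      omega

theorem pvTripRemove_length_lt (hand : List String) (h : hand ≠ []) :
    (pvTripRemove hand (hand.headD "")).1.length < hand.length := by
  cases hand with
  | nil => simp at h
  | cons x t =>
    have : pvTripRemove (x :: t) ((x :: t).headD "") =
        t.foldl (pvTripStep x) ([], 1) := by
      simp [pvTripRemove, pvTripStep]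
    rw [this]
    have := pvTripFold_len_le x t [] 1
    simp at this ⊢
    omega

theorem pvRunFold_len_le (first second third : String) (xs : List String) :
    ∀ l f2 f3 f4, ((xs.foldl (pvRunStep first second third) (l, f2, f3, f4)).1.length ≤ l.length + xs.length) := by
  induction xs with
  | nil => simp
  | cons x t ih =>
    intro l f2 f3 f4
    simp only [List.foldl_cons, pvRunStep]
    split
    · have := ih l true f3 f4
      simp only [List.length_cons] at this ⊢
      omega
    · split
      · have := ih l f2 true f4
        simp only [List.length_cons] at this ⊢
        omega
      · split
        · have := ih l f2 f3 true
          simp only [List.length_cons] at this ⊢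
          omega
        · have := ih (l ++ [x]) f2 f3 f4
          simp only [List.length_cons, List.length_append, List.length_nil] at this ⊢
          omega

theorem pvRunRemove_length_lt (hand : List String) (second third : String) (h : hand ≠ []) :
    (pvRunRemove hand (hand.headD "") second third).1.length < hand.length := by
  cases hand with
  | nil => simp at h
  | cons x t =>
    have : pvRunRemove (x :: t) ((x :: t).headD "") second third =
        t.foldl (pvRunStep x second third) ([], true, false, false) := by
      simp [pvRunRemove, pvRunStep]
    rw [this]
    have := pvRunFold_len_le x second third t [] true false false
    simp at this ⊢
    omega

def can_make_sets (hand : List String) : Bool :=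
  if _h : hand.isEmpty then true          -- if len(hand) == 0: return True
  else
    let first := hand.headD ""            -- first = hand[0] (hand is nonempty here)
    let count := pvCount hand first
    let trip : Bool :=
      if 3 ≤ count then
        can_make_sets (PySem.List.sorted (pvTripRemove hand first).1 (fun x => x) false)
      else false
    if trip then true                     -- if can_make_sets(sorted(new_hand)): return True
    else if PySem.Str.len first == 2 then
      match PySem.Str.pyGet? first 0 with
      | none => false                     -- unreachable: first has length 2
      | some c =>
        if PySem.Chars.isdigit c then
          match PySem.Int.ofStr? (String.ofList [c]) with   -- number = int(first[0])
          | none => false                 -- unreachable: int() succeeds on a digit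
          | some number =>
            let suit := match PySem.Str.pyGet? first 1 with  -- suit = first[1]
              | some s => String.ofList [s]
              | none => ""
            let second := pvStrAdd (PySem.Int.toStr (number + 1)) suit
            let third := pvStrAdd (PySem.Int.toStr (number + 2)) suit
            let has := pvHas hand second third
            if has.1 && has.2 then
              can_make_sets (PySem.List.sorted (pvRunRemove hand first second third).1 (fun x => x) false)
            else false
        else false
    else false
termination_by hand.length
decreasing_by
  · simpa [PySem.List.length_sorted] using
      pvTripRemove_length_lt hand (by simpa [List.isEmpty_iff] using _h)
  · simpa [PySem.List.length_sorted] using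
      pvRunRemove_length_lt hand _ _ (by simpa [List.isEmpty_iff] using _h)

-- ===== PORT B =====
-- Python '+' on str for port B, kernel-transparent
def strConcat (a b : String) : String := String.ofList (a.toList ++ b.toList)

-- list.remove(v): Python raises ValueError when v is absent; every call below is guarded so v ∈ xs
def pyRemove (xs : List String) (v : String) : List String :=
  (PySem.List.remove? xs v).getD xs

theorem pyRemove_eq_erase (xs : List String) (v : String) : pyRemove xs v = xs.erase v := by
  by_cases h : v ∈ xs
  · simp [pyRemove, PySem.List.remove?_eq_some_erase xs v h]
  · simp [pyRemove, List.erase_of_not_mem h, (PySem.List.remove?_eq_none_iff xs v).mpr h]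

theorem erase3_head_length_lt (hand : List String) (v w : String) (h : hand ≠ []) :
    (((hand.erase (hand.headD "")).erase v).erase w).length < hand.length := by
  cases hand with
  | nil => simp at h
  | cons x t =>
    have h1 : (x :: t).erase ((x :: t).headD "") = t := by simp
    rw [h1]
    calc ((t.erase v).erase w).length ≤ (t.erase v).length := List.length_erase_le
      _ ≤ t.length := List.length_erase_le
      _ < (x :: t).length := by simp

-- the memoised solver: returns the answer together with the updated memo dict
def solveB (memo : PySem.Dict (List String) Bool) (hand : List String) :
    Bool × PySem.Dict (List String) Bool :=
  match memo.get? hand with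
  | some v => (v, memo)                   -- if hand in memo: return memo[hand]
  | none =>
    if _h : hand.isEmpty then (true, memo)
    else
      let first := hand.headD ""
      let p1 :=
        if 3 ≤ PySem.List.count hand first then
          solveB memo (PySem.List.sorted
            (pyRemove (pyRemove (pyRemove hand first) first) first) (fun x => x) false)
        else (false, memo)
      let p2 :=
        if p1.1 then (true, p1.2)
        else if PySem.Str.len first == 2 then
          match PySem.Str.pyGet? first 0 with
          | none => (false, p1.2)
          | some c =>
            if PySem.Chars.isdigit c then
              match PySem.Int.ofStr? (String.ofList [c]) with
              | none => (false, p1.2)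
              | some number =>
                let suit := match PySem.Str.pyGet? first 1 with
                  | some s => String.ofList [s]
                  | none => ""
                let second := strConcat (PySem.Int.toStr (number + 1)) suit
                let third := strConcat (PySem.Int.toStr (number + 2)) suit
                if hand.contains second && hand.contains third then
                  solveB p1.2 (PySem.List.sorted
                    (pyRemove (pyRemove (pyRemove hand first) second) third) (fun x => x) false)
                else (false, p1.2)
            else (false, p1.2)
        else (false, p1.2)
      (p2.1, p2.2.insert hand p2.1)       -- memo[hand] = result; return result
termination_by hand.length
decreasing_by
  · simpa [PySem.List.length_sorted, pyRemove_eq_erase] using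
      erase3_head_length_lt hand _ _ (by simpa [List.isEmpty_iff] using _h)
  · simpa [PySem.List.length_sorted, pyRemove_eq_erase] using
      erase3_head_length_lt hand _ _ (by simpa [List.isEmpty_iff] using _h)

def can_make_sets_alt (hand : List String) : Bool :=
  (solveB PySem.Dict.empty hand).1

-- ===== PRECONDITION & SPEC =====
def Spec_can_make_sets (hand : List String) (out : Bool) : Prop := out = can_make_sets_alt hand
instance (hand : List String) (out : Bool) : Decidable (Spec_can_make_sets hand out) := by unfold Spec_can_make_sets; infer_instance

-- ===== CLAIM (what is proved, stated in full; the proofs are below) =====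
def Claim_equal_can_make_sets : Prop := ∀ (hand : List String), Dom_can_make_sets hand → Spec_can_make_sets hand (can_make_sets hand)

-- ===== LEMMAS AND PROOFS =====

theorem pvCount_eq (hand : List String) (first : String) :
    pvCount hand first = (hand.count first : Int) := by
  simpa [pvCount] using PySem.List.foldl_beq_add_one hand first 0

theorem pvHasFold_eq (second third : String) (hand : List String) :
    ∀ a b, hand.foldl (pvHasStep second third) (a, b) = (a || hand.contains second, b || hand.contains third) := by
  induction hand with
  | nil => simp
  | cons x t ih =>
    intro a b
    simp only [List.foldl_cons, pvHasStep, List.contains_cons, ih]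
    by_cases h2 : x = second
    · subst h2
      by_cases h3 : x = third
      · subst h3; simp
      · have e3 : (third == x) = false := beq_eq_false_iff_ne.mpr (fun h => h3 h.symm)
        simp [e3, h3]
    · have e2 : (second == x) = false := beq_eq_false_iff_ne.mpr (fun h => h2 h.symm)
      have e2' : (x == second) = false := beq_eq_false_iff_ne.mpr h2
      by_cases h3 : x = third
      · subst h3; simp [e2, e2']
      · have e3 : (third == x) = false := beq_eq_false_iff_ne.mpr (fun h => h3 h.symm)
        have e3' : (x == third) = false := beq_eq_false_iff_ne.mpr h3
        simp [e2, e2', e3, e3']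

theorem pvHas_eq (second third : String) (hand : List String) :
    pvHas hand second third = (hand.contains second, hand.contains third) := by
  simpa [pvHas] using pvHasFold_eq second third hand false false

-- k-fold "erase the first occurrence of v"
def eraseK (v : String) : List String → Nat → List String
  | xs, 0 => xs
  | xs, n + 1 => eraseK v (xs.erase v) n

theorem eraseK_nil (v : String) : ∀ n, eraseK v [] n = [] := by
  intro n; induction n with
  | zero => rfl
  | succ n ih => simpa [eraseK] using ih

theorem eraseK_cons_ne (v x : String) (h : x ≠ v) :
    ∀ (t : List String) n, eraseK v (x :: t) n = x :: eraseK v t n := by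
  intro t n
  induction n generalizing t with
  | zero => rfl
  | succ n ih =>
    rw [show eraseK v (x :: t) (n + 1) = eraseK v ((x :: t).erase v) n from rfl,
        List.erase_cons_tail (by simp [h]),
        show eraseK v t (n + 1) = eraseK v (t.erase v) n from rfl]
    exact ih _

theorem pvTripFold_eq (first : String) :
    ∀ (xs : List String) (l : List String) (r : Int), 0 ≤ r → r ≤ 3 →
      (xs.foldl (pvTripStep first) (l, r)).1 = l ++ eraseK first xs (3 - r).toNat := by
  intro xs
  induction xs with
  | nil => intro l r _ _; simp [eraseK_nil]
  | cons x t ih =>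
    intro l r h0 h3
    simp only [List.foldl_cons, pvTripStep]
    by_cases hx : x = first
    · subst hx
      by_cases hr : r < 3
      · rw [if_pos (by simp [hr])]
        rw [ih l (r + 1) (by omega) (by omega)]
        have hk : (3 - r).toNat = (3 - (r + 1)).toNat + 1 := by omega
        rw [hk]
        simp only [eraseK, List.erase_cons_head]
      · rw [if_neg (by simp [hr])]
        have hr3 : r = 3 := by omega
        subst hr3
        rw [ih (l ++ [x]) 3 (by omega) (by omega)]
        simp [eraseK]
    · rw [if_neg (by simp [hx])]
      rw [ih (l ++ [x]) r h0 h3, eraseK_cons_ne first x hx]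
      simp

theorem pvTripRemove_eq_erase3 (hand : List String) (first : String) :
    (pvTripRemove hand first).1 = ((hand.erase first).erase first).erase first := by
  have := pvTripFold_eq first hand [] 0 (by omega) (by omega)
  simpa [pvTripRemove, eraseK, show ((3:Int) - 0).toNat = 3 from rfl] using this

-- conditional erase, one per removed_* flag of A's run-removal loop
def erIf (b : Bool) (v : String) (xs : List String) : List String :=
  if b then xs else xs.erase v

theorem erIf_cons (b : Bool) (v x : String) (xs : List String) (h : b = true ∨ x ≠ v) :
    erIf b v (x :: xs) = x :: erIf b v xs := by
  rcases h with h | h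
  · subst h; rfl
  · cases b
    · simp only [erIf, Bool.false_eq_true, if_false]
      exact List.erase_cons_tail (by simp [h])
    · rfl

theorem erIf_false_cons_self (v : String) (xs : List String) :
    erIf false v (v :: xs) = xs := by
  simp [erIf]

theorem pvRunFold_eq (f s t' : String) (hfs : f ≠ s) (hft : f ≠ t') (hst : s ≠ t') :
    ∀ (xs l : List String) (rf rs rt : Bool),
      (xs.foldl (pvRunStep f s t') (l, rf, rs, rt)).1 = l ++ erIf rt t' (erIf rs s (erIf rf f xs)) := by
  intro xs
  induction xs with
  | nil => intro l rf rs rt; cases rf <;> cases rs <;> cases rt <;> simp [erIf]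
  | cons x t ih =>
    intro l rf rs rt
    simp only [List.foldl_cons, pvRunStep]
    by_cases h1 : x = f ∧ rf = false
    · obtain ⟨hx, hb⟩ := h1
      subst hb
      rw [if_pos (by simp [hx]), ih l true rs rt, show erIf false f (x :: t) = t by
        rw [hx]; exact erIf_false_cons_self f t]
      rfl
    · rw [if_neg (by intro hc; simp at hc; exact h1 ⟨hc.1, by simpa using hc.2⟩)]
      by_cases h2 : x = s ∧ rs = false
      · obtain ⟨hx, hb⟩ := h2
        subst hb
        have hxf : x ≠ f := by rw [hx]; exact fun h => hfs h.symm
        rw [if_pos (by simp [hx]), ih l rf true rt, erIf_cons rf f x t (Or.inr hxf),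
            show erIf false s (x :: erIf rf f t) = erIf rf f t by
              rw [hx]; exact erIf_false_cons_self s _]
        rfl
      · rw [if_neg (by intro hc; simp at hc; exact h2 ⟨hc.1, by simpa using hc.2⟩)]
        by_cases h3 : x = t' ∧ rt = false
        · obtain ⟨hx, hb⟩ := h3
          subst hb
          have hxf : x ≠ f := by rw [hx]; exact fun h => hft h.symm
          have hxs : x ≠ s := by rw [hx]; exact fun h => hst h.symm
          rw [if_pos (by simp [hx]), ih l rf rs true, erIf_cons rf f x t (Or.inr hxf),
              erIf_cons rs s x (erIf rf f t) (Or.inr hxs),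
              show erIf false t' (x :: erIf rs s (erIf rf f t)) = erIf rs s (erIf rf f t) by
                rw [hx]; exact erIf_false_cons_self t' _]
          rfl
        · rw [if_neg (by intro hc; simp at hc; exact h3 ⟨hc.1, by simpa using hc.2⟩)]
          rw [ih (l ++ [x]) rf rs rt]
          have c1 : rf = true ∨ x ≠ f := by
            rcases Bool.eq_false_or_eq_true rf with h | h
            · left; exact h
            · right; intro hx; exact h1 ⟨hx, h⟩
          have c2 : rs = true ∨ x ≠ s := by
            rcases Bool.eq_false_or_eq_true rs with h | h
            · left; exact h
            · right; intro hx; exact h2 ⟨hx, h⟩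
          have c3 : rt = true ∨ x ≠ t' := by
            rcases Bool.eq_false_or_eq_true rt with h | h
            · left; exact h
            · right; intro hx; exact h3 ⟨hx, h⟩
          rw [erIf_cons rf f x t c1, erIf_cons rs s x (erIf rf f t) c2,
              erIf_cons rt t' x (erIf rs s (erIf rf f t)) c3]
          simp

theorem pvRunRemove_eq_erase3 (hand : List String) (first second third : String)
    (hfs : first ≠ second) (hft : first ≠ third) (hst : second ≠ third) :
    (pvRunRemove hand first second third).1 = ((hand.erase first).erase second).erase third := by
  have := pvRunFold_eq first second third hfs hft hst hand [] false false false
  simpa [pvRunRemove, erIf] using this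

theorem digit_cases (c : Char) (h : PySem.Chars.isdigit c = true) :
    c = '0' ∨ c = '1' ∨ c = '2' ∨ c = '3' ∨ c = '4' ∨ c = '5' ∨ c = '6' ∨ c = '7' ∨ c = '8' ∨ c = '9' := by
  simp [PySem.Chars.isdigit] at h
  obtain ⟨h1, h2⟩ := h
  have h1' : 48 ≤ c.toNat := h1
  have h2' : c.toNat ≤ 57 := h2
  have hc : c = Char.ofNat c.toNat := (Char.ofNat_toNat c).symm
  interval_cases h : c.toNat <;> rw [hc] <;> decide

-- first = "<digit><suit>"; its successor tiles str(n+1)+suit and str(n+2)+suit are three distinct strings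
theorem run_tiles_distinct (c s : Char) (number : Int)
    (hdig : PySem.Chars.isdigit c = true)
    (hnum : PySem.Int.ofStr? (String.ofList [c]) = some number) :
    String.ofList [c, s] ≠ pvStrAdd (PySem.Int.toStr (number + 1)) (String.ofList [s]) ∧
    String.ofList [c, s] ≠ pvStrAdd (PySem.Int.toStr (number + 2)) (String.ofList [s]) ∧
    pvStrAdd (PySem.Int.toStr (number + 1)) (String.ofList [s]) ≠
      pvStrAdd (PySem.Int.toStr (number + 2)) (String.ofList [s]) := by
  rcases digit_cases c hdig with rfl | rfl | rfl | rfl | rfl | rfl | rfl | rfl | rfl | rfl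
  · rw [(by decide : PySem.Int.ofStr? (String.ofList ['0']) = some (0 : Int))] at hnum
    obtain rfl := (Option.some_inj.mp hnum)
    refine ⟨?_, ?_, ?_⟩ <;>
      simp only [pvStrAdd, PySem.Int.toList_toStr, String.toList_ofList, ne_eq, String.ofList_inj,
        (by decide : PySem.Int.toChars ((0 : Int) + 1) = ['1']),
        (by decide : PySem.Int.toChars ((0 : Int) + 2) = ['2'])] <;> simp
  · rw [(by decide : PySem.Int.ofStr? (String.ofList ['1']) = some (1 : Int))] at hnum
    obtain rfl := (Option.some_inj.mp hnum)
    refine ⟨?_, ?_, ?_⟩ <;>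
      simp only [pvStrAdd, PySem.Int.toList_toStr, String.toList_ofList, ne_eq, String.ofList_inj,
        (by decide : PySem.Int.toChars ((1 : Int) + 1) = ['2']),
        (by decide : PySem.Int.toChars ((1 : Int) + 2) = ['3'])] <;> simp
  · rw [(by decide : PySem.Int.ofStr? (String.ofList ['2']) = some (2 : Int))] at hnum
    obtain rfl := (Option.some_inj.mp hnum)
    refine ⟨?_, ?_, ?_⟩ <;>
      simp only [pvStrAdd, PySem.Int.toList_toStr, String.toList_ofList, ne_eq, String.ofList_inj,
        (by decide : PySem.Int.toChars ((2 : Int) + 1) = ['3']),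
        (by decide : PySem.Int.toChars ((2 : Int) + 2) = ['4'])] <;> simp
  · rw [(by decide : PySem.Int.ofStr? (String.ofList ['3']) = some (3 : Int))] at hnum
    obtain rfl := (Option.some_inj.mp hnum)
    refine ⟨?_, ?_, ?_⟩ <;>
      simp only [pvStrAdd, PySem.Int.toList_toStr, String.toList_ofList, ne_eq, String.ofList_inj,
        (by decide : PySem.Int.toChars ((3 : Int) + 1) = ['4']),
        (by decide : PySem.Int.toChars ((3 : Int) + 2) = ['5'])] <;> simp
  · rw [(by decide : PySem.Int.ofStr? (String.ofList ['4']) = some (4 : Int))] at hnum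
    obtain rfl := (Option.some_inj.mp hnum)
    refine ⟨?_, ?_, ?_⟩ <;>
      simp only [pvStrAdd, PySem.Int.toList_toStr, String.toList_ofList, ne_eq, String.ofList_inj,
        (by decide : PySem.Int.toChars ((4 : Int) + 1) = ['5']),
        (by decide : PySem.Int.toChars ((4 : Int) + 2) = ['6'])] <;> simp
  · rw [(by decide : PySem.Int.ofStr? (String.ofList ['5']) = some (5 : Int))] at hnum
    obtain rfl := (Option.some_inj.mp hnum)
    refine ⟨?_, ?_, ?_⟩ <;>
      simp only [pvStrAdd, PySem.Int.toList_toStr, String.toList_ofList, ne_eq, String.ofList_inj,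
        (by decide : PySem.Int.toChars ((5 : Int) + 1) = ['6']),
        (by decide : PySem.Int.toChars ((5 : Int) + 2) = ['7'])] <;> simp
  · rw [(by decide : PySem.Int.ofStr? (String.ofList ['6']) = some (6 : Int))] at hnum
    obtain rfl := (Option.some_inj.mp hnum)
    refine ⟨?_, ?_, ?_⟩ <;>
      simp only [pvStrAdd, PySem.Int.toList_toStr, String.toList_ofList, ne_eq, String.ofList_inj,
        (by decide : PySem.Int.toChars ((6 : Int) + 1) = ['7']),
        (by decide : PySem.Int.toChars ((6 : Int) + 2) = ['8'])] <;> simp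
  · rw [(by decide : PySem.Int.ofStr? (String.ofList ['7']) = some (7 : Int))] at hnum
    obtain rfl := (Option.some_inj.mp hnum)
    refine ⟨?_, ?_, ?_⟩ <;>
      simp only [pvStrAdd, PySem.Int.toList_toStr, String.toList_ofList, ne_eq, String.ofList_inj,
        (by decide : PySem.Int.toChars ((7 : Int) + 1) = ['8']),
        (by decide : PySem.Int.toChars ((7 : Int) + 2) = ['9'])] <;> simp
  · rw [(by decide : PySem.Int.ofStr? (String.ofList ['8']) = some (8 : Int))] at hnum
    obtain rfl := (Option.some_inj.mp hnum)
    refine ⟨?_, ?_, ?_⟩ <;>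
      simp only [pvStrAdd, PySem.Int.toList_toStr, String.toList_ofList, ne_eq, String.ofList_inj,
        (by decide : PySem.Int.toChars ((8 : Int) + 1) = ['9']),
        (by decide : PySem.Int.toChars ((8 : Int) + 2) = ['1', '0'])] <;> simp
  · rw [(by decide : PySem.Int.ofStr? (String.ofList ['9']) = some (9 : Int))] at hnum
    obtain rfl := (Option.some_inj.mp hnum)
    refine ⟨?_, ?_, ?_⟩ <;>
      simp only [pvStrAdd, PySem.Int.toList_toStr, String.toList_ofList, ne_eq, String.ofList_inj,
        (by decide : PySem.Int.toChars ((9 : Int) + 1) = ['1', '0']),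
        (by decide : PySem.Int.toChars ((9 : Int) + 2) = ['1', '1'])] <;> simp

theorem strConcat_eq_pvStrAdd (a b : String) : strConcat a b = pvStrAdd a b := rfl

-- memo invariant: every stored value is A's answer for its key
def InvB (memo : PySem.Dict (List String) Bool) : Prop :=
  ∀ k v, memo.get? k = some v → v = can_make_sets k

theorem InvB_insert (memo : PySem.Dict (List String) Bool) (h : List String) (b : Bool)
    (hinv : InvB memo) (hb : b = can_make_sets h) : InvB (memo.insert h b) := by
  intro k v hk
  rw [PySem.Dict.get?_insert] at hk
  split at hk
  · next heq =>
    subst heq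
    rw [← Option.some_inj.mp hk, hb]
  · exact hinv _ _ hk

theorem solveB_nil (memo : PySem.Dict (List String) Bool) (hinv : InvB memo) :
    (solveB memo []).1 = can_make_sets [] ∧ InvB (solveB memo []).2 := by
  rcases hm : memo.get? [] with _ | v
  · rw [solveB]
    simp only [hm]
    rw [can_make_sets]
    simp
    exact hinv
  · rw [solveB]
    simp only [hm]
    exact ⟨hinv _ _ hm, hinv⟩

theorem conclude (p : Bool × PySem.Dict (List String) Bool) (hand : List String)
    (h1 : p.1 = can_make_sets hand) (h2 : InvB p.2) :
    p.1 = can_make_sets hand ∧ InvB (p.2.insert hand p.1) :=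
  ⟨h1, InvB_insert _ _ _ h2 h1⟩

theorem solveB_spec (n : Nat) : ∀ (hand : List String) (memo : PySem.Dict (List String) Bool),
    hand.length ≤ n → InvB memo →
    (solveB memo hand).1 = can_make_sets hand ∧ InvB (solveB memo hand).2 := by
  induction n with
  | zero =>
    intro hand memo hlen hinv
    have h0 : hand = [] := by cases hand <;> simp_all
    subst h0
    exact solveB_nil memo hinv
  | succ n ih =>
    intro hand memo hlen hinv
    cases hand with
    | nil => exact solveB_nil memo hinv
    | cons x t =>
    rcases hm : memo.get? (x :: t) with _ | v
    · have hlt1 : (PySem.List.sorted ((((x :: t).erase x).erase x).erase x) (fun y => y) false).length ≤ n := by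
        rw [PySem.List.length_sorted]
        have h := erase3_head_length_lt (x :: t) x x (by simp)
        simp only [List.headD_cons, List.length_cons] at h
        simp only [List.length_cons] at hlen
        omega
      rw [solveB]
      simp only [hm, List.isEmpty_cons, Bool.false_eq_true, dite_false, List.headD_cons]
      refine conclude _ _ ?_ ?_
      · -- first component equals A
        rw [can_make_sets]
        simp only [List.isEmpty_cons, Bool.false_eq_true, dite_false, List.headD_cons]
        rw [pvCount_eq, pvTripRemove_eq_erase3, PySem.List.count_eq]
        simp only [pyRemove_eq_erase, strConcat_eq_pvStrAdd, Nat.ofNat_le_cast]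
        by_cases h3 : 3 ≤ List.count x (x :: t)
        · rw [if_pos h3, if_pos h3]
          obtain ⟨hrec1, hinv1⟩ :=
            ih (PySem.List.sorted ((((x :: t).erase x).erase x).erase x) (fun y => y) false) memo hlt1 hinv
          rw [hrec1]
          by_cases hT : can_make_sets (PySem.List.sorted ((((x :: t).erase x).erase x).erase x) (fun y => y) false) = true
          · rw [hT]; simp
          · rw [Bool.not_eq_true] at hT
            rw [hT]
            simp only [Bool.false_eq_true, if_false]
            have hinvm1 := hinv1
            by_cases hl2 : (PySem.Str.len x == 2) = true
            · rw [if_pos hl2, if_pos hl2]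
              rcases hg0 : PySem.Str.pyGet? x 0 with _ | c
              · simp [hg0]
              · simp only [hg0]
                by_cases hd : PySem.Chars.isdigit c = true
                · rw [if_pos hd, if_pos hd]
                  rcases hof : PySem.Int.ofStr? (String.ofList [c]) with _ | number
                  · simp [hof]
                  · simp only [hof]
                    have hlen2 : x.toList.length = 2 := by
                      simp only [PySem.Str.len_eq, beq_iff_eq] at hl2
                      exact_mod_cast hl2
                    obtain ⟨a, b, hab⟩ := List.length_eq_two.mp hlen2
                    have hg0' : PySem.Str.pyGet? x 0 = some a := by
                      simp [PySem.Str.pyGet?_eq, PySem.Chars.pyGet?_eq_listPyGet?, hab]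
                    have hca : c = a := by
                      rw [hg0] at hg0'
                      exact Option.some_inj.mp hg0'
                    have hg1 : PySem.Str.pyGet? x 1 = some b := by
                      simp [PySem.Str.pyGet?_eq, PySem.Chars.pyGet?_eq_listPyGet?, hab, PySem.List.pyGet?, PySem.List.pyIdx?]
                    simp only [hg1]
                    have hx : x = String.ofList [c, b] := by
                      apply String.toList_inj.mp
                      rw [String.toList_ofList, hab, hca]
                    obtain ⟨d1, d2, d3⟩ := run_tiles_distinct c b number hd hof
                    have f1 : x ≠ pvStrAdd (PySem.Int.toStr (number + 1)) (String.ofList [b]) := by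
                      rw [hx]; exact d1
                    have f2 : x ≠ pvStrAdd (PySem.Int.toStr (number + 2)) (String.ofList [b]) := by
                      rw [hx]; exact d2
                    rw [pvHas_eq]
                    by_cases hhas : (((x :: t).contains (pvStrAdd (PySem.Int.toStr (number + 1)) (String.ofList [b]))) && ((x :: t).contains (pvStrAdd (PySem.Int.toStr (number + 2)) (String.ofList [b])))) = true
                    · rw [if_pos hhas, if_pos (by simpa using hhas)]
                      rw [pvRunRemove_eq_erase3 _ _ _ _ f1 f2 d3]
                      have hlt2 : (PySem.List.sorted ((((x :: t).erase x).erase (pvStrAdd (PySem.Int.toStr (number + 1)) (String.ofList [b]))).erase (pvStrAdd (PySem.Int.toStr (number + 2)) (String.ofList [b]))) (fun y => y) false).length ≤ n := by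
                        rw [PySem.List.length_sorted]
                        have h := erase3_head_length_lt (x :: t) (pvStrAdd (PySem.Int.toStr (number + 1)) (String.ofList [b])) (pvStrAdd (PySem.Int.toStr (number + 2)) (String.ofList [b])) (by simp)
                        simp only [List.headD_cons, List.length_cons] at h
                        simp only [List.length_cons] at hlen
                        omega
                      exact (ih _ _ hlt2 hinvm1).1
                    · rw [if_neg hhas, if_neg (by simpa using hhas)]
                · rw [if_neg hd, if_neg hd]
            · rw [if_neg hl2, if_neg hl2]
        · rw [if_neg h3, if_neg h3]
          simp only [Bool.false_eq_true, if_false]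
          have hinvm1 := hinv
          by_cases hl2 : (PySem.Str.len x == 2) = true
          · rw [if_pos hl2, if_pos hl2]
            rcases hg0 : PySem.Str.pyGet? x 0 with _ | c
            · simp [hg0]
            · simp only [hg0]
              by_cases hd : PySem.Chars.isdigit c = true
              · rw [if_pos hd, if_pos hd]
                rcases hof : PySem.Int.ofStr? (String.ofList [c]) with _ | number
                · simp [hof]
                · simp only [hof]
                  have hlen2 : x.toList.length = 2 := by
                    simp only [PySem.Str.len_eq, beq_iff_eq] at hl2
                    exact_mod_cast hl2
                  obtain ⟨a, b, hab⟩ := List.length_eq_two.mp hlen2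
                  have hg0' : PySem.Str.pyGet? x 0 = some a := by
                    simp [PySem.Str.pyGet?_eq, PySem.Chars.pyGet?_eq_listPyGet?, hab]
                  have hca : c = a := by
                    rw [hg0] at hg0'
                    exact Option.some_inj.mp hg0'
                  have hg1 : PySem.Str.pyGet? x 1 = some b := by
                    simp [PySem.Str.pyGet?_eq, PySem.Chars.pyGet?_eq_listPyGet?, hab, PySem.List.pyGet?, PySem.List.pyIdx?]
                  simp only [hg1]
                  have hx : x = String.ofList [c, b] := by
                    apply String.toList_inj.mp
                    rw [String.toList_ofList, hab, hca]
                  obtain ⟨d1, d2, d3⟩ := run_tiles_distinct c b number hd hof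
                  have f1 : x ≠ pvStrAdd (PySem.Int.toStr (number + 1)) (String.ofList [b]) := by
                    rw [hx]; exact d1
                  have f2 : x ≠ pvStrAdd (PySem.Int.toStr (number + 2)) (String.ofList [b]) := by
                    rw [hx]; exact d2
                  rw [pvHas_eq]
                  by_cases hhas : (((x :: t).contains (pvStrAdd (PySem.Int.toStr (number + 1)) (String.ofList [b]))) && ((x :: t).contains (pvStrAdd (PySem.Int.toStr (number + 2)) (String.ofList [b])))) = true
                  · rw [if_pos hhas, if_pos (by simpa using hhas)]
                    rw [pvRunRemove_eq_erase3 _ _ _ _ f1 f2 d3]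
                    have hlt2 : (PySem.List.sorted ((((x :: t).erase x).erase (pvStrAdd (PySem.Int.toStr (number + 1)) (String.ofList [b]))).erase (pvStrAdd (PySem.Int.toStr (number + 2)) (String.ofList [b]))) (fun y => y) false).length ≤ n := by
                      rw [PySem.List.length_sorted]
                      have h := erase3_head_length_lt (x :: t) (pvStrAdd (PySem.Int.toStr (number + 1)) (String.ofList [b])) (pvStrAdd (PySem.Int.toStr (number + 2)) (String.ofList [b])) (by simp)
                      simp only [List.headD_cons, List.length_cons] at h
                      simp only [List.length_cons] at hlen
                      omega
                    exact (ih _ _ hlt2 hinvm1).1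
                  · rw [if_neg hhas, if_neg (by simpa using hhas)]
              · rw [if_neg hd, if_neg hd]
          · rw [if_neg hl2, if_neg hl2]
      · -- invariant on the pre-insert dict
        simp only [pyRemove_eq_erase, strConcat_eq_pvStrAdd, PySem.List.count_eq]
        by_cases h3 : 3 ≤ List.count x (x :: t)
        · rw [if_pos h3]
          obtain ⟨hrec1, hinv1⟩ :=
            ih (PySem.List.sorted ((((x :: t).erase x).erase x).erase x) (fun y => y) false) memo hlt1 hinv
          by_cases hT : (solveB memo (PySem.List.sorted ((((x :: t).erase x).erase x).erase x) (fun y => y) false)).1 = true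
          · rw [if_pos hT]
            exact hinv1
          · rw [if_neg hT]
            have hinvm1 := hinv1
            by_cases hl2 : (PySem.Str.len x == 2) = true
            · rw [if_pos hl2]
              rcases hg0 : PySem.Str.pyGet? x 0 with _ | c
              · simpa only [hg0] using hinvm1
              · simp only [hg0]
                by_cases hd : PySem.Chars.isdigit c = true
                · rw [if_pos hd]
                  rcases hof : PySem.Int.ofStr? (String.ofList [c]) with _ | number
                  · simpa only [hof] using hinvm1
                  · simp only [hof]
                    by_cases hhas : (((x :: t).contains (pvStrAdd (PySem.Int.toStr (number + 1)) (match PySem.Str.pyGet? x 1 with | some s => String.ofList [s] | none => ""))) && ((x :: t).contains (pvStrAdd (PySem.Int.toStr (number + 2)) (match PySem.Str.pyGet? x 1 with | some s => String.ofList [s] | none => "")))) = true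
                    · rw [if_pos hhas]
                      have hlt2 : (PySem.List.sorted ((((x :: t).erase x).erase (pvStrAdd (PySem.Int.toStr (number + 1)) (match PySem.Str.pyGet? x 1 with | some s => String.ofList [s] | none => ""))).erase (pvStrAdd (PySem.Int.toStr (number + 2)) (match PySem.Str.pyGet? x 1 with | some s => String.ofList [s] | none => ""))) (fun y => y) false).length ≤ n := by
                        rw [PySem.List.length_sorted]
                        have h := erase3_head_length_lt (x :: t) (pvStrAdd (PySem.Int.toStr (number + 1)) (match PySem.Str.pyGet? x 1 with | some s => String.ofList [s] | none => "")) (pvStrAdd (PySem.Int.toStr (number + 2)) (match PySem.Str.pyGet? x 1 with | some s => String.ofList [s] | none => "")) (by simp)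
                        simp only [List.headD_cons, List.length_cons] at h
                        simp only [List.length_cons] at hlen
                        omega
                      exact (ih _ _ hlt2 hinvm1).2
                    · rw [if_neg hhas]
                      exact hinvm1
                · rw [if_neg hd]
                  exact hinvm1
            · rw [if_neg hl2]
              exact hinvm1
        · rw [if_neg h3]
          rw [if_neg (by simp : ¬((false, memo) : Bool × PySem.Dict (List String) Bool).1 = true)]
          have hinvm1 := hinv
          by_cases hl2 : (PySem.Str.len x == 2) = true
          · rw [if_pos hl2]
            rcases hg0 : PySem.Str.pyGet? x 0 with _ | c
            · simpa only [hg0] using hinvm1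
            · simp only [hg0]
              by_cases hd : PySem.Chars.isdigit c = true
              · rw [if_pos hd]
                rcases hof : PySem.Int.ofStr? (String.ofList [c]) with _ | number
                · simpa only [hof] using hinvm1
                · simp only [hof]
                  by_cases hhas : (((x :: t).contains (pvStrAdd (PySem.Int.toStr (number + 1)) (match PySem.Str.pyGet? x 1 with | some s => String.ofList [s] | none => ""))) && ((x :: t).contains (pvStrAdd (PySem.Int.toStr (number + 2)) (match PySem.Str.pyGet? x 1 with | some s => String.ofList [s] | none => "")))) = true
                  · rw [if_pos hhas]
                    have hlt2 : (PySem.List.sorted ((((x :: t).erase x).erase (pvStrAdd (PySem.Int.toStr (number + 1)) (match PySem.Str.pyGet? x 1 with | some s => String.ofList [s] | none => ""))).erase (pvStrAdd (PySem.Int.toStr (number + 2)) (match PySem.Str.pyGet? x 1 with | some s => String.ofList [s] | none => ""))) (fun y => y) false).length ≤ n := by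
                      rw [PySem.List.length_sorted]
                      have h := erase3_head_length_lt (x :: t) (pvStrAdd (PySem.Int.toStr (number + 1)) (match PySem.Str.pyGet? x 1 with | some s => String.ofList [s] | none => "")) (pvStrAdd (PySem.Int.toStr (number + 2)) (match PySem.Str.pyGet? x 1 with | some s => String.ofList [s] | none => "")) (by simp)
                      simp only [List.headD_cons, List.length_cons] at h
                      simp only [List.length_cons] at hlen
                      omega
                    exact (ih _ _ hlt2 hinvm1).2
                  · rw [if_neg hhas]
                    exact hinvm1
              · rw [if_neg hd]
                exact hinvm1
          · rw [if_neg hl2]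
            exact hinvm1
    · rw [solveB]
      simp only [hm]
      exact ⟨hinv _ _ hm, hinv⟩

-- ===== VERDICT (by name: the statement is the Claim_ definition above) =====
theorem can_make_sets_spec : Claim_equal_can_make_sets := by
  intro hand _
  have h := (solveB_spec hand.length hand PySem.Dict.empty le_rfl
    (by intro k v hk; simp [PySem.Dict.get?_empty] at hk)).1
  unfold Spec_can_make_sets can_make_sets_alt
  exact h.symm
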